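-- pv_equiv track=rewrite | github.com/Gigahawk/pymadcad | mesh.py | striplist
-- ===== SOURCE A (Python) =====
-- def striplist(list, used):
-- 	''' remove all elements of list that match a False in used, return a reindexation list '''
-- 	reindex = [0] * len(list)
-- 	j = 0
-- 	for i,u in enumerate(used):
-- 		if u:
-- 			list[j] = list[i]
-- 			reindex[i] = j
-- 			j += 1
-- 	list[j:] = []
-- 	return reindex
-- ===== SOURCE B (Python) =====
-- def striplist(list, used):
--     ''' remove all elements of list that match a False in used, return a reindexation list '''
--     kept = [i for i, u in enumerate(used) if u]
--     reindex = [0] * len(list)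
--     for j, i in enumerate(kept):
--         reindex[i] = j
--     list[:len(kept)] = [list[i] for i in kept]
--     del list[len(kept):]
--     return reindex
-- ===== Notes on version B (the rewrite author's own statement) =====
-- stated objective: alternative
-- what changed: A's single fused loop (write-in-place compaction, reindex fill and counter j all in one pass) is split into an explicit index table of kept positions built first, then a separate reindex-filling loop over enumerate(kept), then a slice-assignment rebuild of the compacted values.
-- outside the precondition, e.g. on striplist([1], [True, True]): A raises IndexError, B raises IndexError
import Mathlib
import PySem

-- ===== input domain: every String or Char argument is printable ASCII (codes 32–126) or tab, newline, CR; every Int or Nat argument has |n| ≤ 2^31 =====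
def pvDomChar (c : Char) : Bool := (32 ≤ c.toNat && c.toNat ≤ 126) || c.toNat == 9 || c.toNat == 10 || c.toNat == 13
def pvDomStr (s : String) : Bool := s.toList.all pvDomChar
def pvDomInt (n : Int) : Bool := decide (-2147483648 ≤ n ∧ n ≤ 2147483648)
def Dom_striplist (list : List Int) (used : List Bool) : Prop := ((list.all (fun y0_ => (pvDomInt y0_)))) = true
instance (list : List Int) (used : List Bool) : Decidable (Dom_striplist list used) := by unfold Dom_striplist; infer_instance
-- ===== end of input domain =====

-- B splits A's fused compaction loop into an index-table build plus separate fill/rebuild passes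
-- (objective: alternative); equivalence is about the RETURN value (both Pythons mutate `list` identically).

-- ===== PORT A =====
-- A's single loop `for i,u in enumerate(used)` with state (list, reindex, j); the in-place
-- writes list[j] = list[i] keep the (truncated-later) list in the state; reindex is returned.
def striplistGo : List Bool → Nat → Nat → List Int → List Int → (List Int × List Int × Nat)
  | [], _, j, lst, r => (lst, r, j)
  | u :: us, i, j, lst, r =>
    if u then striplistGo us (i+1) (j+1) (lst.set j (lst.getD i 0)) (r.set i (Int.ofNat j))
    else striplistGo us (i+1) j lst r

def striplist (list : List Int) (used : List Bool) : List Int :=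
  (striplistGo used 0 0 list (List.replicate list.length 0)).2.1

-- ===== PORT B =====
def striplist_alt (list : List Int) (used : List Bool) : List Int :=
  let kept := ((PySem.List.enumerate used 0).filter (fun p => p.2)).map (fun p => p.1)
  (PySem.List.enumerate kept 0).foldl (fun r p => r.set p.2.toNat p.1)
    (List.replicate list.length 0)

-- ===== PRECONDITION & SPEC =====
-- Pre_ excludes exactly the inputs where Python A raises IndexError: a True in `used`
-- at an index ≥ len(list) (B raises the same IndexError there).
def Pre_striplist (list : List Int) (used : List Bool) : Prop :=
  (used.drop list.length).all (fun u => !u) = true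
instance (list : List Int) (used : List Bool) : Decidable (Pre_striplist list used) := by
  unfold Pre_striplist; infer_instance
def pvWitness_striplist : List Int × List Bool := ([5, 7, 9], [true, false, true])

def Spec_striplist (list : List Int) (used : List Bool) (out : List Int) : Prop := out = striplist_alt list used
instance (list : List Int) (used : List Bool) (out : List Int) : Decidable (Spec_striplist list used out) := by unfold Spec_striplist; infer_instance

-- ===== CLAIM (what is proved, stated in full; the proofs are below) =====
def Claim_equal_striplist : Prop := ∀ (list : List Int) (used : List Bool), Dom_striplist list used → Pre_striplist list used → Spec_striplist list used (striplist list used)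

-- ===== LEMMAS AND PROOFS =====

-- the offset positions of the True entries of a mask
def keptFrom : Nat → List Bool → List Nat
  | _, [] => []
  | i, u :: us => if u then i :: keptFrom (i+1) us else keptFrom (i+1) us

-- filling r with r[k] := j, j counting up from an offset
def fillFrom : Nat → List Nat → List Int → List Int
  | _, [], r => r
  | j, k :: ks, r => fillFrom (j+1) ks (r.set k (Int.ofNat j))

theorem striplistGo_proj (us : List Bool) (i j : Nat) (lst r : List Int) :
    (striplistGo us i j lst r).2.1 = fillFrom j (keptFrom i us) r := by
  induction us generalizing i j lst r with
  | nil => rfl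
  | cons u us ih =>
    cases u <;> simp [striplistGo, keptFrom, fillFrom, ih]

theorem kept_eq (us : List Bool) (i : Nat) :
    ((PySem.List.enumerate us (i : Int)).filter (fun p => p.2)).map (fun p => p.1)
      = (keptFrom i us).map Int.ofNat := by
  induction us generalizing i with
  | nil => simp [PySem.List.enumerate_nil, keptFrom]
  | cons u us ih =>
    rw [PySem.List.enumerate_cons]
    have h2 := ih (i + 1)
    push_cast at h2
    cases u
    · simp [keptFrom, h2]
    · simp [keptFrom, h2]

theorem fold_eq (ks : List Nat) (j : Nat) (r : List Int) :
    (PySem.List.enumerate (ks.map Int.ofNat) (j : Int)).foldl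
        (fun r p => r.set p.2.toNat p.1) r
      = fillFrom j ks r := by
  induction ks generalizing j r with
  | nil => simp [PySem.List.enumerate_nil, fillFrom]
  | cons k ks ih =>
    rw [List.map_cons, PySem.List.enumerate_cons]
    have h2 := ih (j + 1)
    push_cast at h2
    simp [fillFrom, h2]

-- ===== VERDICT (by name: the statement is the Claim_ definition above) =====
theorem striplist_spec : Claim_equal_striplist := by
  intro list used _ _
  unfold Spec_striplist striplist striplist_alt
  rw [striplistGo_proj]
  have hk := kept_eq used 0
  norm_num at hk
  rw [hk]
  have hf := fold_eq (keptFrom 0 used) 0 (List.replicate list.length 0)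
  norm_num at hf
  rw [hf]
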